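-- pv_equiv track=rewrite | github.com/bnbinder/NLP-Conversation-Summarizer | oldquestionclassif/trial1.py | parseTextIntoSent
-- ===== SOURCE A (Python) =====
-- def parseTextIntoSent(text):
--     sentences = []
--     minIndex = 0
--     for index, char in enumerate(text):
--         if char == ".":
--             sentences.append(text[minIndex:index])
--             minIndex = index + 2
--     return sentences
-- ===== SOURCE B (Python) =====
-- def parseTextIntoSent(text):
--     parts = text.split(".")[:-1]
--     return [p if i == 0 else p[1:] for i, p in enumerate(parts)]
-- ===== Notes on version B (the rewrite author's own statement) =====
-- stated objective: simpler
-- what changed: Replaced A's character-by-character scan with its minIndex accumulator state by one split on the period character followed by a comprehension that keeps the first piece and strips the leading character of every later piece; constant-factor speedup from doing the scan inside str.split.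
import Mathlib
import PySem

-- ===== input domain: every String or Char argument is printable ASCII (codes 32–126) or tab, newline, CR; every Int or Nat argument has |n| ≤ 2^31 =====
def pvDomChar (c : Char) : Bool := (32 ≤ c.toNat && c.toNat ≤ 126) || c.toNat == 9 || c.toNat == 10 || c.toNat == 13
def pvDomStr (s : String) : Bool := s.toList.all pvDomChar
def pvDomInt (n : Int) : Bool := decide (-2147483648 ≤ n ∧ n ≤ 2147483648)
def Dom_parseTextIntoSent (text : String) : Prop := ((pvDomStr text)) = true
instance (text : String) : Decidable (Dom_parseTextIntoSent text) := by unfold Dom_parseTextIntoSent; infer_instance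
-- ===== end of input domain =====

-- B replaces A's index-tracking character scan by text.split(".") followed by a
-- comprehension over all-but-the-last piece (objective: simpler).


-- ===== PORT A =====
-- loop body of A: on '.', append text[minIndex:index] and set minIndex = index + 2
def pvStepA (text : String) (st : List String × Int) (p : Int × Char) : List String × Int :=
  if p.2 == '.' then (st.1 ++ [PySem.Str.slice text (some st.2) (some p.1)], p.1 + 2)
  else st

def parseTextIntoSent (text : String) : List String :=
  ((PySem.List.enumerate text.toList 0).foldl (pvStepA text) ([], 0)).1

-- ===== PORT B =====
def parseTextIntoSent_alt (text : String) : List String :=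
  (PySem.List.enumerate
      (PySem.List.slice (PySem.Chars.splitOn text.toList ['.']) none (some (-1))) 0).map
    (fun p => if p.1 == 0 then String.ofList p.2
              else String.ofList (PySem.List.slice p.2 (some 1) none))

-- ===== PRECONDITION & SPEC =====
def Spec_parseTextIntoSent (text : String) (out : List String) : Prop := out = parseTextIntoSent_alt text
instance (text : String) (out : List String) : Decidable (Spec_parseTextIntoSent text out) := by unfold Spec_parseTextIntoSent; infer_instance

-- ===== CLAIM (what is proved, stated in full; the proofs are below) =====
def Claim_equal_parseTextIntoSent : Prop := ∀ (text : String), Dom_parseTextIntoSent text → Spec_parseTextIntoSent text (parseTextIntoSent text)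

-- ===== LEMMAS AND PROOFS =====

-- prepend x to the head piece (helper to describe Python's split)
def pvGlue (x : List Char) : List (List Char) → List (List Char)
  | [] => [x]
  | h :: r => (x ++ h) :: r

-- structural description of text.split("."): pieces between the dots, empties kept
def pvSplit1 : List Char → List (List Char)
  | [] => [[]]
  | c :: t => if c = '.' then [] :: pvSplit1 t else pvGlue [c] (pvSplit1 t)

theorem pvSplit1_ne_nil (t : List Char) : pvSplit1 t ≠ [] := by
  cases t with
  | nil => simp [pvSplit1]
  | cons c r =>
    simp only [pvSplit1]
    split
    · simp
    · cases h : pvSplit1 r <;> simp [pvGlue]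

theorem pvGlue_nil (p : List (List Char)) (h : p ≠ []) : pvGlue [] p = p := by
  cases p with
  | nil => exact absurd rfl h
  | cons a r => simp [pvGlue]

theorem pvGlue_glue (x y : List Char) (p : List (List Char)) :
    pvGlue x (pvGlue y p) = pvGlue (x ++ y) p := by
  cases p <;> simp [pvGlue]

theorem pvGo_spec (fuel : Nat) : ∀ (l cur : List Char) (acc : List (List Char)),
    l.length ≤ fuel →
    PySem.Chars.splitOn.go ['.'] fuel l cur acc = acc.reverse ++ pvGlue cur.reverse (pvSplit1 l) := by
  induction fuel with
  | zero =>
    intro l cur acc h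
    have hl : l = [] := by cases l <;> simp_all
    subst hl
    simp [PySem.Chars.splitOn.go, pvSplit1, pvGlue]
  | succ n ih =>
    intro l cur acc h
    cases l with
    | nil => simp [PySem.Chars.splitOn.go, pvSplit1, pvGlue]
    | cons c rest =>
      by_cases hc : c = '.'
      · subst hc
        rw [PySem.Chars.splitOn.go]
        simp only [List.isPrefixOf, BEq.rfl, Bool.true_and, if_true,
          List.length_cons, List.length_nil, List.drop_succ_cons, List.drop_zero]
        rw [ih rest [] ((cur.reverse) :: acc) (by simpa using h)]
        rw [show ([] : List Char).reverse = [] from rfl, pvGlue_nil _ (pvSplit1_ne_nil rest)]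
        simp [pvSplit1, pvGlue]
      · rw [PySem.Chars.splitOn.go]
        have hpre : (['.'].isPrefixOf (c :: rest)) = false := by
          simp [List.isPrefixOf]; exact fun h' => absurd h'.symm hc
        rw [hpre]
        simp only [if_false, Bool.false_eq_true]
        rw [ih rest (c :: cur) acc (by simpa using Nat.le_of_succ_le_succ h)]
        simp [pvSplit1, hc, pvGlue_glue]

theorem pvSplitOn_eq (t : List Char) : PySem.Chars.splitOn t ['.'] = pvSplit1 t := by
  unfold PySem.Chars.splitOn
  rw [pvGo_spec (t.length + 1) t [] [] (by omega)]
  simp [pvGlue_nil _ (pvSplit1_ne_nil t)]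

theorem pvSplit1_no_dot (t : List Char) (h : '.' ∉ t) : pvSplit1 t = [t] := by
  induction t with
  | nil => simp [pvSplit1]
  | cons c r ih =>
    have hc : c ≠ '.' := fun hc => h (by simp [hc])
    have hr : '.' ∉ r := fun hr => h (by simp [hr])
    simp [pvSplit1, hc, ih hr, pvGlue]

theorem pvSplit1_append (pre t : List Char) (h : '.' ∉ pre) :
    pvSplit1 (pre ++ '.' :: t) = pre :: pvSplit1 t := by
  induction pre with
  | nil => simp [pvSplit1]
  | cons c r ih =>
    have hc : c ≠ '.' := fun hc => h (by simp [hc])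
    have hr : '.' ∉ r := fun hr => h (by simp [hr])
    simp [pvSplit1, hc, ih hr, pvGlue]

theorem pvDecomp (t : List Char) (h : '.' ∈ t) :
    ∃ pre t', '.' ∉ pre ∧ t = pre ++ '.' :: t' := by
  induction t with
  | nil => simp at h
  | cons c r ih =>
    by_cases hc : c = '.'
    · exact ⟨[], r, by simp, by simp [hc]⟩
    · have hr : '.' ∈ r := by
        rcases List.mem_cons.mp h with h' | h'
        · exact absurd h'.symm hc
        · exact h'
      obtain ⟨pre, t', hp, ht⟩ := ih hr
      refine ⟨c :: pre, t', ?_, by simp [ht]⟩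
      simp only [List.mem_cons, not_or]
      exact ⟨fun h' => hc h'.symm, hp⟩

-- a stretch of the text without periods leaves A's loop state untouched
theorem pvFoldl_no_dot (text : String) (pre : List Char) (h : '.' ∉ pre) :
    ∀ (s : Int) (st : List String × Int),
      List.foldl (pvStepA text) st (PySem.List.enumerate pre s) = st := by
  induction pre with
  | nil => intro s st; simp [PySem.List.enumerate_nil]
  | cons c r ih =>
    intro s st
    have hc : c ≠ '.' := fun hc => h (by simp [hc])
    have hr : '.' ∉ r := fun hr => h (by simp [hr])
    rw [PySem.List.enumerate_cons, List.foldl_cons]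
    have : pvStepA text st (s, c) = st := by simp [pvStepA, hc]
    rw [this, ih hr]

-- B's comprehension body: past the first piece, every piece p contributes p[1:]
theorem pvMapEnum (l : List (List Char)) : ∀ (s : Int), 0 < s →
    (PySem.List.enumerate l s).map
      (fun p => if p.1 == 0 then String.ofList p.2
                else String.ofList (PySem.List.slice p.2 (some 1) none)) =
    l.map (fun p => String.ofList (p.drop 1)) := by
  induction l with
  | nil => intro s _; simp [PySem.List.enumerate_nil]
  | cons a r ih =>
    intro s hs
    rw [PySem.List.enumerate_cons, List.map_cons, List.map_cons, ih (s + 1) (by omega)]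
    have hne : (s == 0) = false := by simp; omega
    simp only [hne, Bool.false_eq_true, if_false]
    rw [PySem.List.slice_from a (by norm_num)]
    norm_num

-- value appended at a period at absolute index off + |pre|, minIndex = off + 1
theorem pvSliceVal (text : String) (off : Nat) (pre t' : List Char)
    (hdrop : text.toList.drop off = pre ++ '.' :: t') :
    PySem.Str.slice text (some ((off : Int) + 1)) (some ((off : Int) + (pre.length : Int))) =
      String.ofList (pre.drop 1) := by
  unfold PySem.Str.slice
  rw [PySem.Chars.slice_eq_listSlice]
  rw [show ((off : Int) + 1) = ((off + 1 : Nat) : Int) by push_cast; ring,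
      show ((off : Int) + (pre.length : Int)) = ((off + pre.length : Nat) : Int) by push_cast; ring]
  rw [PySem.List.slice_toNat _ (by positivity) (by positivity)]
  simp only [Int.toNat_natCast]
  have h1 : off + pre.length - (off + 1) = pre.length - 1 := by omega
  have h2 : List.drop (off + 1) text.toList = List.drop 1 (pre ++ '.' :: t') := by
    rw [← List.drop_drop, ← hdrop]
  rw [h1, h2]
  cases pre with
  | nil => simp
  | cons p0 pr => simp [List.take_left' rfl]

-- main loop invariant: from a state just past a period, A appends exactly the
-- tail-dropped pieces of the remaining text
theorem pvAux (n : Nat) : ∀ (t : List Char) (text : String) (off : Nat) (acc : List String),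
    t.length ≤ n → text.toList.drop off = t →
    (List.foldl (pvStepA text) (acc, (off : Int) + 1) (PySem.List.enumerate t (off : Int))).1 =
      acc ++ (pvSplit1 t).dropLast.map (fun p => String.ofList (p.drop 1)) := by
  induction n using Nat.strong_induction_on with
  | _ n ih =>
    intro t text off acc hlen hdrop
    by_cases hmem : '.' ∈ t
    · obtain ⟨pre, t', hp, ht⟩ := pvDecomp t hmem
      subst ht
      rw [PySem.List.enumerate_append, List.foldl_append, pvFoldl_no_dot text pre hp,
          PySem.List.enumerate_cons, List.foldl_cons]
      have hstep : pvStepA text (acc, (off : Int) + 1) ((off : Int) + (pre.length : Int), '.') =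
          (acc ++ [String.ofList (pre.drop 1)], (off : Int) + (pre.length : Int) + 2) := by
        simp [pvStepA, pvSliceVal text off pre t' hdrop]
      rw [hstep]
      have hcast1 : (off : Int) + (pre.length : Int) + 1 = ((off + pre.length + 1 : Nat) : Int) := by
        push_cast; ring
      have hcast2 : (off : Int) + (pre.length : Int) + 2 = ((off + pre.length + 1 : Nat) : Int) + 1 := by
        push_cast; ring
      rw [hcast1, hcast2]
      have hdrop' : text.toList.drop (off + pre.length + 1) = t' := by
        have h2 : List.drop (pre.length + 1) (List.drop off text.toList) =
            text.toList.drop (off + pre.length + 1) := by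
          rw [List.drop_drop]
          congr 1
        rw [← h2, hdrop, show pre ++ '.' :: t' = (pre ++ ['.']) ++ t' by simp,
            List.drop_left' (by simp)]
      have hlt : t'.length < n := by
        have h' := hlen
        rw [List.length_append, List.length_cons] at h'
        omega
      rw [ih t'.length hlt t' text (off + pre.length + 1) _ le_rfl hdrop']
      rw [pvSplit1_append pre t' hp,
          List.dropLast_cons_of_ne_nil (pvSplit1_ne_nil t'), List.map_cons]
      simp
    · rw [pvFoldl_no_dot text t hmem]
      simp [pvSplit1_no_dot t hmem]

-- ===== VERDICT (by name: the statement is the Claim_ definition above) =====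
theorem parseTextIntoSent_spec : Claim_equal_parseTextIntoSent := by
  intro text _
  unfold Spec_parseTextIntoSent parseTextIntoSent parseTextIntoSent_alt
  rw [pvSplitOn_eq, PySem.List.slice_to_neg_one]
  by_cases hmem : '.' ∈ text.toList
  · obtain ⟨pre, t', hp, ht⟩ := pvDecomp text.toList hmem
    rw [ht, PySem.List.enumerate_append, List.foldl_append, pvFoldl_no_dot text pre hp,
        PySem.List.enumerate_cons, List.foldl_cons]
    simp only [zero_add]
    have hstep : pvStepA text (([] : List String), 0) (((pre.length : Nat) : Int), '.') =
        ([String.ofList pre], ((pre.length : Nat) : Int) + 2) := by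
      have hs : PySem.Str.slice text (some 0) (some ((pre.length : Nat) : Int)) =
          String.ofList pre := by
        unfold PySem.Str.slice
        rw [PySem.Chars.slice_eq_listSlice]
        rw [PySem.List.slice_toNat _ le_rfl (by positivity)]
        simp only [Int.toNat_natCast, Int.toNat_zero, Nat.sub_zero, List.drop_zero]
        rw [ht, List.take_left' rfl]
      simp [pvStepA, hs]
    rw [hstep]
    have hcast1 : ((pre.length : Nat) : Int) + 1 = ((pre.length + 1 : Nat) : Int) := by
      push_cast; ring
    have hcast2 : ((pre.length : Nat) : Int) + 2 = ((pre.length + 1 : Nat) : Int) + 1 := by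
      push_cast; ring
    rw [hcast1, hcast2]
    have hdrop' : text.toList.drop (pre.length + 1) = t' := by
      rw [ht, show pre ++ '.' :: t' = (pre ++ ['.']) ++ t' by simp, List.drop_left' (by simp)]
    rw [pvAux t'.length t' text (pre.length + 1) _ le_rfl hdrop']
    rw [pvSplit1_append pre t' hp,
        List.dropLast_cons_of_ne_nil (pvSplit1_ne_nil t'), PySem.List.enumerate_cons]
    rw [List.map_cons, pvMapEnum _ (0 + 1) (by omega)]
    simp
  · rw [pvFoldl_no_dot text text.toList hmem]
    rw [pvSplit1_no_dot text.toList hmem]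
    simp [PySem.List.enumerate_nil]
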